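-- pv_equiv track=rewrite | github.com/TakuyaJinno/comhom | comhom3.py | boundaryOperator
-- ===== SOURCE A (Python) =====
-- def boundaryOperator(Q):
--     sgn = 1
--     c = {}
--     for i in range(len(Q)):
--         if Q[i][0] != Q[i][1]:
--             Qtmp = list(Q)
--             ql = Q[i][0]
--             qr = Q[i][1]
--             Qtmp[i] = (ql,ql)
--             c[tuple(Qtmp)] = -sgn
--             Qtmp[i] = (qr,qr)
--             c[tuple(Qtmp)] = sgn
--             sgn = -sgn
--     return c
-- ===== SOURCE B (Python) =====
-- def _bnd(t):
--     # boundary pairs of tuple t relative to leading sign +1, by structural recursion: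
--     # recurse on the tail, then prefix the head onto every key (negating signs when
--     # the head itself contributes a pair of faces).
--     if not t:
--         return []
--     (ql, qr), rest = t[0], t[1:]
--     sub = _bnd(rest)
--     if ql == qr:
--         return [((t[0],) + k, v) for k, v in sub]
--     return [(((ql, ql),) + rest, -1), (((qr, qr),) + rest, 1)] \
--          + [((t[0],) + k, -v) for k, v in sub]
--
-- def boundaryOperator(Q):
--     return dict(_bnd(tuple(Q)))
-- ===== Notes on version B (the rewrite author's own statement) =====
-- stated objective: alternative
-- what changed: B replaces A's index loop with in-place mutation of copies and a toggled running sign by a structural recursion on the simplex list: the boundary of the tail is computed first (relative sign +1), then the head is prefixed onto every tail key (negating the signs when the head contributes its own pair of faces), and the dict is built once from the resulting pair list.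
import Mathlib
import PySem

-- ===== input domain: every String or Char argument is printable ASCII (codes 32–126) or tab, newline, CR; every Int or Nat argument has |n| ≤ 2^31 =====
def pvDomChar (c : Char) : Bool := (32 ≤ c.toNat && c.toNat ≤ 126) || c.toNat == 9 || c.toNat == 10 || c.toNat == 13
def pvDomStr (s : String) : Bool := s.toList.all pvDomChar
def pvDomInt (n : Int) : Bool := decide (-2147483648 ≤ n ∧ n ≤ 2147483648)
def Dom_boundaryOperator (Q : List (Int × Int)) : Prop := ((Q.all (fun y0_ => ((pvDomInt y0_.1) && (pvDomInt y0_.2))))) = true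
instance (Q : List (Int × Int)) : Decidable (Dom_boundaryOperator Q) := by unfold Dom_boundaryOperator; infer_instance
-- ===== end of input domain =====

-- B computes the boundary by structural recursion on the simplex list (tail boundary first,
-- head prefixed onto every tail key with signs negated when the head contributes faces, one
-- final dict construction) instead of A's index loop with mutated copies and a toggled sign;
-- return values proved identical (alternative decomposition, same cost).

-- ===== PORT A =====
def boundaryOperator (Q : List (Int × Int)) : List (List (Int × Int) × Int) :=
  let st :=
    (PySem.List.pyRange 0 Q.length 1).foldl
      (fun (st : Int × PySem.Dict (List (Int × Int)) Int) i =>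
        let q := PySem.List.pyGetD Q i (0, 0)
        if q.1 != q.2 then
          let ql := q.1
          let qr := q.2
          let Qtmp := PySem.List.pySetD Q i (ql, ql)
          let c := st.2.insert Qtmp (-st.1)
          let Qtmp2 := PySem.List.pySetD Qtmp i (qr, qr)
          let c2 := c.insert Qtmp2 st.1
          (-st.1, c2)
        else st)
      (1, PySem.Dict.empty)
  st.2.items

-- ===== PORT B =====
-- recursive helper _bnd of Source B: boundary pair list of the tail, head prefixed onto every key
def pvBnd : List (Int × Int) → List (List (Int × Int) × Int)
  | [] => []
  | h :: rest =>
    let sub := pvBnd rest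
    if h.1 == h.2 then sub.map (fun p => (h :: p.1, p.2))
    else ((h.1, h.1) :: rest, -1) :: ((h.2, h.2) :: rest, 1)
         :: sub.map (fun p => (h :: p.1, -p.2))

def boundaryOperator_alt (Q : List (Int × Int)) : List (List (Int × Int) × Int) :=
  (PySem.Dict.ofList (pvBnd Q)).items

-- ===== PRECONDITION & SPEC =====
def Spec_boundaryOperator (Q : List (Int × Int)) (out : List (List (Int × Int) × Int)) : Prop := out = boundaryOperator_alt Q
instance (Q : List (Int × Int)) (out : List (List (Int × Int) × Int)) : Decidable (Spec_boundaryOperator Q out) := by unfold Spec_boundaryOperator; infer_instance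

-- ===== CLAIM (what is proved, stated in full; the proofs are below) =====
def Claim_equal_boundaryOperator : Prop := ∀ (Q : List (Int × Int)), Dom_boundaryOperator Q → Spec_boundaryOperator Q (boundaryOperator Q)

-- ===== LEMMAS AND PROOFS =====

-- Dict.ofList is the insert fold
theorem pvOfList (l : List (List (Int × Int) × Int)) :
    PySem.Dict.ofList l = l.foldl (fun d p => d.insert p.1 p.2) PySem.Dict.empty := by
  simp [PySem.Dict.ofList, PySem.Dict.update]

-- the pair sequence A inserts, indexed formulation with A's toggled sign
def pvPairs (Q : List (Int × Int)) : List Int → Int → List (List (Int × Int) × Int)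
  | [], _ => []
  | i :: is, sgn =>
    let q := PySem.List.pyGetD Q i (0, 0)
    if q.1 != q.2 then
      (PySem.List.pySetD Q i (q.1, q.1), -sgn)
        :: (PySem.List.pySetD (PySem.List.pySetD Q i (q.1, q.1)) i (q.2, q.2), sgn)
        :: pvPairs Q is (-sgn)
    else pvPairs Q is sgn

-- A's loop from any state equals inserting pvPairs one after the other
theorem pvA_loop (Q : List (Int × Int)) (is : List Int) (sgn : Int)
    (c : PySem.Dict (List (Int × Int)) Int) :
    (is.foldl
      (fun (st : Int × PySem.Dict (List (Int × Int)) Int) i =>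
        if (PySem.List.pyGetD Q i (0, 0)).1 != (PySem.List.pyGetD Q i (0, 0)).2 then
          (-st.1,
            (st.2.insert
                (PySem.List.pySetD Q i ((PySem.List.pyGetD Q i (0, 0)).1, (PySem.List.pyGetD Q i (0, 0)).1))
                (-st.1)).insert
              (PySem.List.pySetD
                (PySem.List.pySetD Q i ((PySem.List.pyGetD Q i (0, 0)).1, (PySem.List.pyGetD Q i (0, 0)).1)) i
                ((PySem.List.pyGetD Q i (0, 0)).2, (PySem.List.pyGetD Q i (0, 0)).2)) st.1)
        else st)
      (sgn, c)).2
    = (pvPairs Q is sgn).foldl (fun d p => d.insert p.1 p.2) c := by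
  induction is generalizing sgn c with
  | nil => rfl
  | cons i is ih =>
    simp only [List.foldl_cons, pvPairs]
    by_cases h : (PySem.List.pyGetD Q i (0, 0)).1 != (PySem.List.pyGetD Q i (0, 0)).2
    · simp only [h, if_true, List.foldl_cons]
      exact ih _ _
    · simp only [h] at *
      simp only [Bool.false_eq_true, if_false]
      exact ih _ _

-- shifting all indices by one is prefixing the head onto every key
theorem pvPairs_shift (h : Int × Int) (t : List (Int × Int)) (is : List Int) (s : Int)
    (hmem : ∀ i ∈ is, 0 ≤ i) :
    pvPairs (h :: t) (is.map (· + 1)) s = (pvPairs t is s).map (fun p => (h :: p.1, p.2)) := by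
  induction is generalizing s with
  | nil => rfl
  | cons i is ih =>
    have hi : 0 ≤ i := hmem i (List.mem_cons_self ..)
    have hrest : ∀ x ∈ is, 0 ≤ x := fun x hx => hmem x (List.mem_cons_of_mem _ hx)
    have hget : PySem.List.pyGetD (h :: t) (i + 1) (0, 0) = PySem.List.pyGetD t i (0, 0) := by
      rw [PySem.List.pyGetD_of_nonneg _ _ (by omega), PySem.List.pyGetD_of_nonneg _ _ hi]
      have : (i + 1).toNat = i.toNat + 1 := by omega
      rw [this]; rfl
    have hset : ∀ (xs : List (Int × Int)) (v : Int × Int),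
        PySem.List.pySetD (h :: xs) (i + 1) v = h :: PySem.List.pySetD xs i v := by
      intro xs v
      rw [PySem.List.pySetD_of_nonneg _ _ (by omega), PySem.List.pySetD_of_nonneg _ _ hi]
      have : (i + 1).toNat = i.toNat + 1 := by omega
      rw [this]; rfl
    simp only [List.map_cons, pvPairs, hget, hset]
    by_cases hc : (PySem.List.pyGetD t i (0, 0)).1 != (PySem.List.pyGetD t i (0, 0)).2
    · simp only [hc, if_true, ih _ hrest, List.map_cons]
    · simp only [Bool.not_eq_true] at hc
      simp only [hc, Bool.false_eq_true, if_false]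
      exact ih _ hrest

-- pvPairs over the full index range is pvBnd with the sign scaled in
theorem pvPairs_bnd (Q : List (Int × Int)) (sgn : Int) :
    pvPairs Q (PySem.List.pyRange 0 Q.length 1) sgn
      = (pvBnd Q).map (fun p => (p.1, sgn * p.2)) := by
  induction Q generalizing sgn with
  | nil => rfl
  | cons h t ih =>
    have hcast : ((h :: t).length : Int) = (t.length : Int) + 1 := by
      simp
    have hcons : PySem.List.pyRange 0 ((h :: t).length : Int) 1
        = 0 :: PySem.List.pyRange 1 ((t.length : Int) + 1) 1 := by
      rw [hcast, PySem.List.pyRange_one_cons (by omega)]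
      norm_num
    have hshift : PySem.List.pyRange 1 ((t.length : Int) + 1) 1
        = (PySem.List.pyRange 0 (t.length : Int) 1).map (· + 1) := by
      simp only [PySem.List.pyRange_one, List.map_map]
      have hlen : ((t.length : Int) + 1 - 1).toNat = ((t.length : Int) - 0).toNat := by omega
      rw [hlen]
      refine List.map_congr_left ?_
      intro k _
      simp [Function.comp]; omega
    have hmem : ∀ i ∈ PySem.List.pyRange 0 (t.length : Int) 1, 0 ≤ i := by
      intro i hi
      exact (PySem.List.mem_pyRange_one.mp hi).1
    have hget0 : PySem.List.pyGetD (h :: t) 0 (0, 0) = h := by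
      rw [PySem.List.pyGetD_of_nonneg _ _ (by norm_num)]; rfl
    have hset0 : ∀ (a : Int × Int) (xs : List (Int × Int)) (v : Int × Int),
        PySem.List.pySetD (a :: xs) 0 v = v :: xs := by
      intro a xs v
      rw [PySem.List.pySetD_of_nonneg _ _ (by norm_num)]; rfl
    rw [hcons, hshift]
    simp only [pvPairs, hget0, hset0]
    by_cases hc : h.1 != h.2
    · have hne : (h.1 == h.2) = false := by simpa using hc
      simp only [hc, if_true, pvPairs_shift h t _ _ hmem, ih, pvBnd, hne,
        Bool.false_eq_true, if_false, List.map_cons, List.map_map, List.cons.injEq,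
        mul_one, mul_neg_one]
      refine ⟨trivial, trivial, List.map_congr_left ?_⟩
      intro p _
      simp only [Function.comp, Prod.mk.injEq]
      exact ⟨trivial, by ring⟩
    · have heq : (h.1 == h.2) = true := by simpa using hc
      simp only [Bool.not_eq_true] at hc
      simp only [hc, Bool.false_eq_true, if_false,
        pvPairs_shift h t _ _ hmem, ih, pvBnd, heq, if_true, List.map_map]
      refine List.map_congr_left ?_
      intro p _
      simp [Function.comp]

-- ===== VERDICT (by name: the statement is the Claim_ definition above) =====
theorem boundaryOperator_spec : Claim_equal_boundaryOperator := by
  intro Q _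
  unfold Spec_boundaryOperator
  simp only [boundaryOperator, boundaryOperator_alt]
  rw [pvA_loop, ← pvOfList, pvPairs_bnd]
  simp [one_mul]
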